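-- pv_equiv track=rewrite | github.com/jankiwtf/groupib | search_same_domains.py | char_replace
-- ===== SOURCE A (Python) =====
-- def char_replace(word):
--     homoglyphs = {
--     'o':'0',
--     'O':'0',
--     'l':'1',
--     'i':'1',
--     'd':'cl',
--     'w':'vv'
--     }
--     keywords = list()
--     for char in enumerate(word):
--         chars = list(word)
--         homoglyph = homoglyphs.get(char[1])
--         if homoglyph is not None:
--             chars[char[0]] = homoglyph
--             new_word = ''.join(chars)
--             keywords.append(new_word)
--             result = char_replace(new_word)
--             keywords.extend(result)
--     return set(keywords)
-- ===== SOURCE B (Python) =====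
-- def char_replace(word):
--     homoglyphs = {
--     'o':'0',
--     'O':'0',
--     'l':'1',
--     'i':'1',
--     'd':'cl',
--     'w':'vv'
--     }
--
--     def children(w):
--         out = []
--         for i, c in enumerate(w):
--             h = homoglyphs.get(c)
--             if h is not None:
--                 out.append(w[:i] + h + w[i + 1:])
--         return out
--
--     trace = []
--     stack = children(word)[::-1]
--     while stack:
--         w = stack.pop()
--         trace.append(w)
--         stack.extend(children(w)[::-1])
--     return set(trace)
-- ===== Notes on version B (the rewrite author's own statement) =====
-- stated objective: alternative
-- what changed: Replaces A's recursion, which rebuilds a Python set of the whole subtree at every recursive call, by a single explicit-stack depth-first loop that collects all substituted variants once and deduplicates once at the end.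
import Mathlib
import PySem

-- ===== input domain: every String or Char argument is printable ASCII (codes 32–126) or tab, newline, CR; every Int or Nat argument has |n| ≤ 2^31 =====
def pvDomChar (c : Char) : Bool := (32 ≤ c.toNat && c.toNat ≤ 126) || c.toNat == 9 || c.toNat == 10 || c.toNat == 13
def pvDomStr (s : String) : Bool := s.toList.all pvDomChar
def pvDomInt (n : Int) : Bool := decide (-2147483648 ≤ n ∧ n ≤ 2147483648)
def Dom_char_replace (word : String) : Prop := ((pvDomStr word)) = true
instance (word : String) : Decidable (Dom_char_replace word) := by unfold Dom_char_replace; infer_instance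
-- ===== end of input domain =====

-- B replaces A's recursion (which rebuilds a Python set at every call) by one explicit-stack DFS
-- collecting the raw trace with a single dedup at the end; same return value (a set of strings).
-- Both ports work over List Char (words as char lists, String.ofList at the end), which is exact here;
-- dedup (Python set(...)) is PySem.Set.ofList, whose content does not depend on iteration order.

-- ===== PORT A =====
-- homoglyphs.get(c): the dict literal rendered as a match; values as char lists
def hgl (c : Char) : Option (List Char) :=
  if c = 'o' then some ['0']
  else if c = 'O' then some ['0']
  else if c = 'l' then some ['1']
  else if c = 'i' then some ['1']
  else if c = 'd' then some ['c', 'l']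
  else if c = 'w' then some ['v', 'v']
  else none

-- termination potential of a char / word (used only in termination measures)
def potc (c : Char) : Nat :=
  if c = 'd' then 2
  else if c = 'o' then 1 else if c = 'O' then 1 else if c = 'l' then 1
  else if c = 'i' then 1 else if c = 'w' then 1 else 0

def PotL (w : List Char) : Nat := (w.map potc).sum

theorem PotL_append (a b : List Char) : PotL (a ++ b) = PotL a + PotL b := by
  simp [PotL]

theorem PotL_cons (c : Char) (b : List Char) : PotL (c :: b) = potc c + PotL b := by
  simp [PotL]

theorem pot_decrease {c : Char} {g : List Char} (h : hgl c = some g) : PotL g < potc c := by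
  unfold hgl at h
  split_ifs at h <;> simp_all <;> subst_eqs <;> decide

-- A's loop 'for char in enumerate(word): chars = list(word); chars[i] = h; new_word = join(chars)'
-- rendered as a zipper over the characters: at position i, pre = word[:i], c = word[i], rest =
-- word[i+1:], and new_word = pre ++ h ++ rest.  'keywords' is the returned list, built in loop order:
-- new_word, then the elements of char_replace(new_word) (a set: PySem.Set.ofList, whose content is
-- iteration-order independent, as is the final set(keywords)).  crAux [] w = keywords of word w.
def crAux (pre suf : List Char) : List (List Char) :=
  match suf with
  | [] => []
  | c :: rest =>
    match h : hgl c with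
    | none => crAux (pre ++ [c]) rest
    | some g =>
      ((pre ++ g ++ rest) :: PySem.Set.ofList (crAux [] (pre ++ g ++ rest))) ++
        crAux (pre ++ [c]) rest
termination_by (PotL (pre ++ suf), suf.length)
decreasing_by
  · have heq : PotL (pre ++ [c] ++ rest) = PotL (pre ++ c :: rest) := by simp [PotL]
    rw [heq]; exact Prod.Lex.right _ (by simp)
  · apply Prod.Lex.left
    simp only [List.nil_append, PotL_append, PotL_cons]
    have := pot_decrease h
    omega
  · have heq : PotL (pre ++ [c] ++ rest) = PotL (pre ++ c :: rest) := by simp [PotL]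
    rw [heq]; exact Prod.Lex.right _ (by simp)

def char_replace (word : String) : List String :=
  (PySem.Set.ofList (crAux [] word.toList)).map String.ofList

-- ===== PORT B =====
-- children(w): the one-step substitutions w[:i] + h + w[i+1:], in position order (same zipper rendering)
def childrenAux (pre suf : List Char) : List (List Char) :=
  match suf with
  | [] => []
  | c :: rest =>
    match hgl c with
    | none => childrenAux (pre ++ [c]) rest
    | some g => (pre ++ g ++ rest) :: childrenAux (pre ++ [c]) rest

def children (w : List Char) : List (List Char) := childrenAux [] w

-- facts cited by bLoop's termination measure
theorem one_le_potc {c : Char} {g : List Char} (h : hgl c = some g) : 1 ≤ potc c := by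
  unfold hgl at h
  split_ifs at h <;> simp_all <;> subst_eqs <;> decide

theorem childrenAux_mem {x : List Char} : ∀ (suf pre : List Char),
    x ∈ childrenAux pre suf → PotL x < PotL (pre ++ suf) := by
  intro suf
  induction suf with
  | nil => intro pre h; simp [childrenAux] at h
  | cons c rest ih =>
    intro pre h
    rw [childrenAux] at h
    rcases hg : hgl c with _ | g <;> rw [hg] at h <;> try dsimp only at h
    · have := ih (pre ++ [c]) h
      simp only [List.append_assoc, List.singleton_append] at this
      exact this
    · rcases List.mem_cons.mp h with h1 | h1
      · subst h1
        simp only [PotL_append, PotL_cons]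
        have := pot_decrease hg
        omega
      · have := ih (pre ++ [c]) h1
        simp only [List.append_assoc, List.singleton_append] at this
        exact this

theorem children_mem (w : List Char) (c : List Char) (h : c ∈ children w) : PotL c < PotL w := by
  have := childrenAux_mem w [] h
  simpa using this

theorem childrenAux_length : ∀ (suf pre : List Char),
    (childrenAux pre suf).length ≤ PotL suf := by
  intro suf
  induction suf with
  | nil => intro pre; simp [childrenAux, PotL]
  | cons c rest ih =>
    intro pre
    rw [childrenAux]
    rcases hg : hgl c with _ | g <;> dsimp only <;> simp only [PotL_cons, List.length_cons]
    · have := ih (pre ++ [c]); omega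
    · have := ih (pre ++ [c]); have := one_le_potc hg; omega

def pvM (stack : List (List Char)) : Nat :=
  (stack.map (fun v => (PotL v + 1).factorial)).sum

theorem pvM_children_lt (w : List Char) : pvM (children w) < (PotL w + 1).factorial := by
  have hlen : (children w).length ≤ PotL w := by
    have := childrenAux_length w []
    simpa [children] using this
  have hb : ∀ x ∈ (children w).map (fun v => (PotL v + 1).factorial), x ≤ (PotL w).factorial := by
    intro x hx
    rcases List.mem_map.mp hx with ⟨c, hc, rfl⟩
    exact Nat.factorial_le (by have := children_mem w c hc; omega)
  calc pvM (children w) ≤ ((children w).map (fun v => (PotL v + 1).factorial)).length *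
        (PotL w).factorial := by
        simpa using List.sum_le_card_nsmul _ _ hb
    _ ≤ PotL w * (PotL w).factorial := by
        simpa using Nat.mul_le_mul_right (PotL w).factorial hlen
    _ < (PotL w + 1).factorial := by
        rw [Nat.factorial_succ]
        exact Nat.mul_lt_mul_of_lt_of_le (by omega) (le_refl _) (Nat.factorial_pos _)

-- the while loop; the Python stack holds the pending words reversed ([::-1] before extend, pop()
-- from the end), which is exactly 'take the head, push the children in order at the front' here
def bLoop (stack : List (List Char)) : List (List Char) :=
  match stack with
  | [] => []
  | w :: rest => w :: bLoop (children w ++ rest)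
termination_by pvM stack
decreasing_by
  have h := pvM_children_lt w
  simp only [pvM, List.map_append, List.sum_append, List.map_cons, List.sum_cons]
  simp only [pvM] at h
  omega

def char_replace_alt (word : String) : List String :=
  (PySem.Set.ofList (bLoop (children word.toList))).map String.ofList

-- ===== PRECONDITION & SPEC =====
def Spec_char_replace (word : String) (out : List String) : Prop := out = char_replace_alt word
instance (word : String) (out : List String) : Decidable (Spec_char_replace word out) := by unfold Spec_char_replace; infer_instance

-- ===== CLAIM (what is proved, stated in full; the proofs are below) =====
def Claim_equal_char_replace : Prop := ∀ (word : String), Dom_char_replace word → Spec_char_replace word (char_replace word)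

-- ===== LEMMAS AND PROOFS =====

-- the raw (undeduplicated) preorder trace of all substitution descendants of w
def Twords (w : List Char) : List (List Char) :=
  (children w).attach.flatMap (fun c => c.1 :: Twords c.1)
termination_by PotL w
decreasing_by exact children_mem _ _ c.2

theorem Twords_eq (w : List Char) :
    Twords w = (children w).flatMap (fun c => c :: Twords c) := by
  rw [Twords]
  simp [List.flatMap_def]

theorem bLoop_eq (stack : List (List Char)) :
    bLoop stack = stack.flatMap (fun w => w :: Twords w) := by
  induction stack using bLoop.induct with
  | case1 => simp [bLoop]
  | case2 w rest ih =>
    rw [bLoop, ih]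
    simp only [List.flatMap_append, List.flatMap_cons, List.cons_append]
    rw [Twords_eq]

theorem crAux_eq : ∀ (suf pre : List Char),
    crAux pre suf =
      (childrenAux pre suf).flatMap (fun c => c :: PySem.Set.ofList (crAux [] c)) := by
  intro suf
  induction suf with
  | nil => intro pre; rw [crAux, childrenAux]; simp
  | cons c rest ih =>
    intro pre
    rw [crAux, childrenAux]
    rcases hg : hgl c with _ | g <;> dsimp only
    · exact ih (pre ++ [c])
    · simp [List.flatMap_cons, ih (pre ++ [c])]

theorem upd_ofList_right (s xs : List (List Char)) :
    PySem.Set.update s (PySem.Set.ofList xs) = PySem.Set.update s xs := by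
  rw [PySem.Set.update_eq_append_filter, PySem.Set.update_eq_append_filter,
    PySem.Set.ofList_ofList]

theorem upd_flat : ∀ (L s : List (List Char)),
    (∀ c ∈ L, PySem.Set.ofList (crAux [] c) = PySem.Set.ofList (Twords c)) →
    PySem.Set.update s (L.flatMap (fun c => c :: PySem.Set.ofList (crAux [] c))) =
      PySem.Set.update s (L.flatMap (fun c => c :: Twords c)) := by
  intro L
  induction L with
  | nil => intro s _; simp
  | cons c L' ih =>
    intro s h
    simp only [List.flatMap_cons, PySem.Set.update_append, PySem.Set.update_cons]
    rw [h c List.mem_cons_self, upd_ofList_right]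
    exact ih _ (fun x hx => h x (List.mem_cons_of_mem _ hx))

theorem main_aux : ∀ (n : Nat) (w : List Char), PotL w < n →
    PySem.Set.ofList (crAux [] w) = PySem.Set.ofList (Twords w) := by
  intro n
  induction n with
  | zero => intro w h; omega
  | succ n ih =>
    intro w hw
    rw [crAux_eq, Twords_eq, ← PySem.Set.update_nil_left, ← PySem.Set.update_nil_left]
    have : childrenAux [] w = children w := rfl
    rw [this]
    apply upd_flat
    intro c hc
    exact ih c (by have := children_mem w c hc; omega)

-- ===== VERDICT (by name: the statement is the Claim_ definition above) =====
theorem char_replace_spec : Claim_equal_char_replace := by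
  intro word _
  unfold Spec_char_replace char_replace char_replace_alt
  rw [bLoop_eq, ← Twords_eq, main_aux (PotL word.toList + 1) word.toList (by omega)]
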